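-- pv_equiv track=rewrite | github.com/Eilen6316/LinuxAgent | src/linuxagent/services/cluster_service.py | _targets_all_hosts
-- ===== SOURCE A (Python) =====
-- def _targets_all_hosts(text: str) -> bool:
--     patterns = (
--         "all hosts",
--         "all servers",
--         "every host",
--         "every server",
--         "across the cluster",
--         "cluster-wide",
--     )
--     return any(pattern in text for pattern in patterns)
-- ===== SOURCE B (Python) =====
-- _PATTERNS = (
--     "all hosts",
--     "all servers",
--     "every host",
--     "every server",
--     "across the cluster",
--     "cluster-wide",
-- )
--
--
-- def _targets_all_hosts(text: str) -> bool:
--     # single left-to-right scan: at each position, does any pattern start here?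
--     return any(text.startswith(_PATTERNS, i) for i in range(len(text) + 1))
-- ===== Notes on version B (the rewrite author's own statement) =====
-- stated objective: alternative
-- what changed: Replaces six independent substring ('in') searches by a single left-to-right scan over positions that checks at each position whether any of the six patterns starts there (str.startswith with a tuple).
import Mathlib
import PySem

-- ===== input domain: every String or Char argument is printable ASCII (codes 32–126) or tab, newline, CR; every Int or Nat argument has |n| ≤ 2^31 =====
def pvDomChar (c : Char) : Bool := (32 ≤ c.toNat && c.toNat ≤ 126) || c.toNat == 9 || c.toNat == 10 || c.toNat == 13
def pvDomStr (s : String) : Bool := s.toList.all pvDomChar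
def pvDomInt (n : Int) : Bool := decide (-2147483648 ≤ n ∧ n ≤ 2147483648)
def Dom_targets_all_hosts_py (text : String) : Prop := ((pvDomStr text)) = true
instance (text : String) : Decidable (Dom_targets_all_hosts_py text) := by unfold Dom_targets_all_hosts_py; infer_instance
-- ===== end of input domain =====

-- B replaces A's six independent substring searches by a single left-to-right scan over
-- positions that checks at each position whether any pattern starts there (objective: alternative).

-- ===== PORT A =====
-- the tuple of patterns, shared literal data of both programs
def pvPatterns : List String :=
  ["all hosts", "all servers", "every host", "every server", "across the cluster", "cluster-wide"]

def targets_all_hosts_py (text : String) : Bool :=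
  pvPatterns.any (fun pattern => PySem.Str.isIn pattern text)

-- ===== PORT B =====
-- one scan: any(text.startswith(_PATTERNS, i) for i in range(len(text)+1)),
-- as structural recursion over the suffixes of the text
def pvScan (ps : List (List Char)) : List Char → Bool
  | [] => ps.any (fun p => PySem.Chars.startswith [] p)
  | c :: t => ps.any (fun p => PySem.Chars.startswith (c :: t) p) || pvScan ps t

def targets_all_hosts_py_alt (text : String) : Bool :=
  pvScan (pvPatterns.map String.toList) text.toList

-- ===== PRECONDITION & SPEC =====
def Spec_targets_all_hosts_py (text : String) (out : Bool) : Prop := out = targets_all_hosts_py_alt text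
instance (text : String) (out : Bool) : Decidable (Spec_targets_all_hosts_py text out) := by unfold Spec_targets_all_hosts_py; infer_instance

-- ===== CLAIM (what is proved, stated in full; the proofs are below) =====
def Claim_equal_targets_all_hosts_py : Prop := ∀ (text : String), Dom_targets_all_hosts_py text → Spec_targets_all_hosts_py text (targets_all_hosts_py text)

-- ===== LEMMAS AND PROOFS =====

theorem pvScan_iff (ps : List (List Char)) (cs : List Char) :
    pvScan ps cs = true ↔ ∃ p ∈ ps, p <:+: cs := by
  induction cs with
  | nil =>
      simp [pvScan, PySem.Chars.startswith, List.isPrefixOf_iff_prefix]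
  | cons c t ih =>
      simp only [pvScan, Bool.or_eq_true, ih, List.any_eq_true,
        PySem.Chars.startswith, List.isPrefixOf_iff_prefix, List.infix_cons_iff]
      constructor
      · rintro (⟨p, hp, h⟩ | ⟨p, hp, h⟩)
        · exact ⟨p, hp, Or.inl h⟩
        · exact ⟨p, hp, Or.inr h⟩
      · rintro ⟨p, hp, h | h⟩
        · exact Or.inl ⟨p, hp, h⟩
        · exact Or.inr ⟨p, hp, h⟩

-- ===== VERDICT (by name: the statement is the Claim_ definition above) =====
theorem targets_all_hosts_py_spec : Claim_equal_targets_all_hosts_py := by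
  intro text _
  unfold Spec_targets_all_hosts_py targets_all_hosts_py targets_all_hosts_py_alt
  rw [Bool.eq_iff_iff, pvScan_iff]
  simp [List.any_eq_true, PySem.Str.isIn_eq, PySem.Chars.isIn_iff_infix]
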